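-- pv_equiv track=rewrite | github.com/sgdxbc/TrueRoute | crg.py | merge_predicate
-- ===== SOURCE A (Python) =====
-- def merge_predicate(guard, another_guard):
--     if not guard:
--         return another_guard
--     if not another_guard:
--         return guard
--
--     def merge_bound(bound, another_bound):
--         low, high = bound
--         another_low, another_high = another_bound
--         if another_low is not None:
--             low = max(low, another_low) if low is not None else another_low
--         if another_high is not None:
--             high = min(high, another_high) if high is not None else another_high
--         return low, high
--
--     return {
--         variable: merge_bound(
--             guard.get(variable, (None, None)), another_guard.get(variable, (None, None))
--         )
--         for variable in guard.keys() | another_guard.keys()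
--     }
-- ===== SOURCE B (Python) =====
-- def merge_predicate(guard, another_guard):
--     # Group-by then reduce: collect every candidate bound per variable in one
--     # pass over the concatenated items, then aggregate each group.
--     bounds = {}
--     for variable, (low, high) in list(guard.items()) + list(another_guard.items()):
--         lows, highs = bounds.setdefault(variable, ([], []))
--         lows.append(low)
--         highs.append(high)
--
--     def extreme(select, values):
--         values = [value for value in values if value is not None]
--         return select(values) if values else None
--
--     return {
--         variable: (extreme(max, lows), extreme(min, highs))
--         for variable, (lows, highs) in bounds.items()
--     }
-- ===== Notes on version B (the rewrite author's own statement) =====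
-- stated objective: alternative
-- what changed: A merges pairwise over the union of the key sets with a conditional max/min update per key and early-empty returns; B instead does a group-by: one grouping pass over the concatenated item streams collecting all candidate lows/highs per variable, then a reduction pass taking max/min of the non-None candidates (empty group of candidates -> None), with no pairwise merge_bound and no empty special cases.
import Mathlib
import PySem

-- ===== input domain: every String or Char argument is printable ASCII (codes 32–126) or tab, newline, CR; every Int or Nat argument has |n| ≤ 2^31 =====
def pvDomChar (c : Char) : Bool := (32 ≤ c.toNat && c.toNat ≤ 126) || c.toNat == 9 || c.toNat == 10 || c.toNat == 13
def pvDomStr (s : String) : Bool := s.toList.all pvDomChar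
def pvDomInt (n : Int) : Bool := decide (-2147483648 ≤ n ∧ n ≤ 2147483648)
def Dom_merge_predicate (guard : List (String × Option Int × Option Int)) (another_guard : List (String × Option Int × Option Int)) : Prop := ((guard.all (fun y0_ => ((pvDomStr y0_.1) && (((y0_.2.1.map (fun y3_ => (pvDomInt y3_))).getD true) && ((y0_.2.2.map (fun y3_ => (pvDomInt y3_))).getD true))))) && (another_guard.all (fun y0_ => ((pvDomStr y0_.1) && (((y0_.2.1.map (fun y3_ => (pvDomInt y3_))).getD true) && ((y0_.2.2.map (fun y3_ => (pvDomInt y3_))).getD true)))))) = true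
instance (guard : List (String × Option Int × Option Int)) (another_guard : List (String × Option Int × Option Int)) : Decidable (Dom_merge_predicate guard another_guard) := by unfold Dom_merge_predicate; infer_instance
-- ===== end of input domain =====

-- B replaces A's pairwise merge over the union of the key sets (with early-empty returns) by a
-- group-by: collect all candidate lows/highs per variable in one pass over the concatenated item
-- streams, then reduce each group by max/min of the non-None candidates (objective: alternative).

-- ===== PORT A =====
-- A's inner helper merge_bound
def mergeBound (bound : Option Int × Option Int) (another_bound : Option Int × Option Int) :
    Option Int × Option Int :=
  let low := bound.1
  let high := bound.2
  let low := match another_bound.1 with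
    | some al => some (match low with | some l => max l al | none => al)
    | none => low
  let high := match another_bound.2 with
    | some ah => some (match high with | some h => min h ah | none => ah)
    | none => high
  (low, high)

-- Python iterates 'guard.keys() | another_guard.keys()' in hash order; the returned dict is
-- compared ignoring order, so the port fixes the deterministic first-insertion order of the union.
def merge_predicate (guard : List (String × Option Int × Option Int)) (another_guard : List (String × Option Int × Option Int)) : List (String × Option Int × Option Int) :=
  if guard.isEmpty then another_guard
  else if another_guard.isEmpty then guard
  else
    let gd := PySem.Dict.mk guard
    let ad := PySem.Dict.mk another_guard
    let keys : PySem.Set String := PySem.Set.union (PySem.Set.ofList gd.keys) ad.keys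
    (keys.foldl (fun r v =>
        r.insert v (mergeBound (gd.getD v (none, none)) (ad.getD v (none, none))))
      PySem.Dict.empty).items

-- ===== PORT B =====
-- the grouping pass: 'bounds.setdefault(variable, ([], []))' followed by in-place appends is
-- exactly a Dict.modify at that key with default ([], []) appending the two components
def collectBounds (entries : List (String × Option Int × Option Int)) :
    PySem.Dict String (List (Option Int) × List (Option Int)) :=
  entries.foldl
    (fun d p => d.modify p.1 ([], []) (fun b => (b.1 ++ [p.2.1], b.2 ++ [p.2.2])))
    PySem.Dict.empty

-- 'extreme(max, values)': drop the Nones, then Python max = PySem.List.max? (first extremal)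
def extremeMax (values : List (Option Int)) : Option Int :=
  let vs := values.filterMap id
  if vs.isEmpty then none else PySem.List.max? vs (fun v => v)

-- 'extreme(min, values)'
def extremeMin (values : List (Option Int)) : Option Int :=
  let vs := values.filterMap id
  if vs.isEmpty then none else PySem.List.min? vs (fun v => v)

def merge_predicate_alt (guard : List (String × Option Int × Option Int)) (another_guard : List (String × Option Int × Option Int)) : List (String × Option Int × Option Int) :=
  let bounds := collectBounds (guard ++ another_guard)
  -- the final dict comprehension over bounds.items()
  (bounds.items.foldl
      (fun r q => r.insert q.1 (extremeMax q.2.1, extremeMin q.2.2))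
      PySem.Dict.empty).items

-- ===== PRECONDITION & SPEC =====
-- Pre_ admits exactly the association lists that represent Python dicts (no duplicate keys):
-- both parameters of A are dicts, whose key lists are always Nodup.
def Pre_merge_predicate (guard : List (String × Option Int × Option Int)) (another_guard : List (String × Option Int × Option Int)) : Prop :=
  (guard.map Prod.fst).Nodup ∧ (another_guard.map Prod.fst).Nodup
instance (guard : List (String × Option Int × Option Int)) (another_guard : List (String × Option Int × Option Int)) : Decidable (Pre_merge_predicate guard another_guard) := by unfold Pre_merge_predicate; infer_instance

def pvWitness_merge_predicate : (List (String × Option Int × Option Int)) × (List (String × Option Int × Option Int)) :=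
  ([("x", some 1, none), ("y", none, some 5)], [("x", some 3, some 9), ("z", some 0, none)])

def Spec_merge_predicate (guard : List (String × Option Int × Option Int)) (another_guard : List (String × Option Int × Option Int)) (out : List (String × Option Int × Option Int)) : Prop := out = merge_predicate_alt guard another_guard
instance (guard : List (String × Option Int × Option Int)) (another_guard : List (String × Option Int × Option Int)) (out : List (String × Option Int × Option Int)) : Decidable (Spec_merge_predicate guard another_guard out) := by unfold Spec_merge_predicate; infer_instance

-- ===== CLAIM (what is proved, stated in full; the proofs are below) =====
def Claim_equal_merge_predicate : Prop := ∀ (guard : List (String × Option Int × Option Int)) (another_guard : List (String × Option Int × Option Int)), Dom_merge_predicate guard another_guard → Pre_merge_predicate guard another_guard → Spec_merge_predicate guard another_guard (merge_predicate guard another_guard)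

-- ===== LEMMAS AND PROOFS =====

theorem mergeBound_none_left (b : Option Int × Option Int) : mergeBound (none, none) b = b := by
  obtain ⟨l, h⟩ := b; cases l <;> cases h <;> rfl

theorem mergeBound_none_right (b : Option Int × Option Int) : mergeBound b (none, none) = b := by
  obtain ⟨l, h⟩ := b; cases l <;> cases h <;> rfl

-- the value stored by the grouping fold at each key: all lows / highs of entries with that key
theorem getD_collect_fold (l : List (String × Option Int × Option Int))
    (d : PySem.Dict String (List (Option Int) × List (Option Int))) (k : String) :
    (l.foldl (fun d p => d.modify p.1 ([], []) (fun b => (b.1 ++ [p.2.1], b.2 ++ [p.2.2]))) d).getD k ([], [])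
      = ((d.getD k ([], [])).1 ++ (l.filter (fun p => p.1 == k)).map (fun p => p.2.1),
         (d.getD k ([], [])).2 ++ (l.filter (fun p => p.1 == k)).map (fun p => p.2.2)) := by
  induction l generalizing d with
  | nil => simp
  | cons p rest ih =>
    rw [List.foldl_cons, ih]
    rw [PySem.Dict.getD_modify]
    by_cases hk : k = p.1
    · subst hk
      simp
    · have hbe : (p.1 == k) = false := by simpa using Ne.symm hk
      simp [hk, hbe]

-- a dict's entries with a given key, as a list: the first match if present
theorem filter_key {β : Type} (x : List (String × β)) (hx : (x.map Prod.fst).Nodup) (k : String) :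
    x.filter (fun p => p.1 == k) = ((PySem.Dict.mk x).get? k).toList.map (fun v => (k, v)) := by
  induction x with
  | nil => simp [PySem.Dict.get?]
  | cons p rest ih =>
    rw [List.map_cons, List.nodup_cons] at hx
    rw [List.filter_cons, PySem.Dict.get?_mk_cons]
    by_cases hpk : p.1 = k
    · have hrest : rest.filter (fun q => q.1 == k) = [] := by
        apply List.filter_eq_nil_iff.mpr
        intro q hq hbe
        exact hx.1 (by rw [hpk, ← (by simpa using hbe : q.1 = k)]; exact List.mem_map_of_mem hq)
      simp [hpk, hrest, Prod.ext_iff]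
    · have hbe : (p.1 == k) = false := by simpa using hpk
      simp [hbe, ih hx.2]

theorem extremeMax_single (x : Option Int) : extremeMax [x] = x := by
  cases x <;> simp [extremeMax, PySem.List.max?]

theorem extremeMin_single (x : Option Int) : extremeMin [x] = x := by
  cases x <;> simp [extremeMin, PySem.List.min?]

theorem extremeMax_pair (x y : Option Int) :
    extremeMax [x, y] = (match y with
      | some b => some (match x with | some a => max a b | none => b)
      | none => x) := by
  cases x <;> cases y <;> simp [extremeMax, PySem.List.max?] <;>
    split_ifs with h <;> (congr 1; omega)

theorem extremeMin_pair (x y : Option Int) :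
    extremeMin [x, y] = (match y with
      | some b => some (match x with | some a => min a b | none => b)
      | none => x) := by
  cases x <;> cases y <;> simp [extremeMin, PySem.List.min?] <;>
    split_ifs with h <;> (congr 1; omega)

-- B, in closed form: one merged entry per key of the (deduplicated) concatenated key stream
theorem alt_closed_form (g a : List (String × Option Int × Option Int))
    (hg : (g.map Prod.fst).Nodup) (ha : (a.map Prod.fst).Nodup) :
    merge_predicate_alt g a
      = (PySem.Set.ofList ((g ++ a).map Prod.fst)).map (fun k =>
          (k, mergeBound (((PySem.Dict.mk g).get? k).getD (none, none))
                (((PySem.Dict.mk a).get? k).getD (none, none)))) := by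
  unfold merge_predicate_alt collectBounds
  set F := ((g ++ a).foldl (fun d p => d.modify p.1 ([], []) (fun b => (b.1 ++ [p.2.1], b.2 ++ [p.2.2]))) PySem.Dict.empty) with hF
  have hkeys : F.keys = PySem.Set.ofList ((g ++ a).map Prod.fst) := by
    rw [hF, PySem.Dict.keys_foldl_modify_key]
    simp [PySem.Set.update_nil_left]
  have hnd : F.keys.Nodup := by
    rw [hF]; exact PySem.Dict.nodup_keys_foldl_modify_key _ _ _ _ _ PySem.Dict.nodup_keys_empty
  have hitems : F.items = F.keys.map (fun k => (k, F.getD k ([], []))) :=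
    PySem.Dict.items_eq_map_keys F hnd ([], [])
  have hfold := PySem.Dict.items_foldl_insert_fresh (l := F.items)
    (k := fun q => q.1) (v := fun q => (extremeMax q.2.1, extremeMin q.2.2))
    (d := PySem.Dict.empty) (fun q _ => by simp)
    (by simpa [PySem.Dict.keys] using hnd)
  rw [hfold, hitems, List.map_map, hkeys]
  rw [show PySem.Dict.empty.items = ([] : List (String × Option Int × Option Int)) from rfl,
    List.nil_append]
  apply List.map_congr_left
  intro k hk
  have hget : F.getD k ([], [])
      = (((PySem.Dict.mk g).get? k).toList.map (fun v => v.1)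
          ++ ((PySem.Dict.mk a).get? k).toList.map (fun v => v.1),
         ((PySem.Dict.mk g).get? k).toList.map (fun v => v.2)
          ++ ((PySem.Dict.mk a).get? k).toList.map (fun v => v.2)) := by
    rw [hF, getD_collect_fold, List.filter_append, filter_key g hg, filter_key a ha]
    simp [Function.comp_def]
  have hmem : k ∈ g.map Prod.fst ∨ k ∈ a.map Prod.fst := by
    have := (PySem.Set.mem_ofList (xs := (g ++ a).map Prod.fst) (y := k)).mp hk
    simpa using this
  simp only [Function.comp_def]
  rw [hget]
  rcases hgl : (PySem.Dict.mk g).get? k with _ | ⟨gl, gh⟩ <;>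
    rcases hal : (PySem.Dict.mk a).get? k with _ | ⟨al, ah⟩ <;>
    simp only [Option.toList_none, Option.toList_some, List.map_nil, List.map_cons,
      List.nil_append, List.append_nil, Option.getD_none, Option.getD_some]
  · exfalso
    rw [PySem.Dict.get?_eq_none_iff_not_mem_keys] at hgl hal
    rcases hmem with hm | hm
    · exact hgl (by simpa [PySem.Dict.keys_mk] using hm)
    · exact hal (by simpa [PySem.Dict.keys_mk] using hm)
  · rw [extremeMax_single, extremeMin_single, mergeBound_none_left]
  · rw [extremeMax_single, extremeMin_single, mergeBound_none_right]
  · rw [show ([gl] ++ [al] : List (Option Int)) = [gl, al] from rfl,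
      show ([gh] ++ [ah] : List (Option Int)) = [gh, ah] from rfl,
      extremeMax_pair, extremeMin_pair]
    cases gl <;> cases gh <;> cases al <;> cases ah <;> rfl

-- a dict mapped entrywise through a first-match lookup of itself is itself
theorem map_get_self (a : List (String × Option Int × Option Int))
    (ha : (a.map Prod.fst).Nodup) :
    a.map (fun p => (p.1, (((PySem.Dict.mk a).get? p.1).getD ((none : Option Int), (none : Option Int))))) = a := by
  conv_rhs => rw [← List.map_id a]
  apply List.map_congr_left
  intro p hp
  have : (PySem.Dict.mk a).get? p.1 = some p.2 :=
    PySem.Dict.get?_of_mem_items (PySem.Dict.mk a) (k := p.1) (v := p.2) hp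
      (by rw [PySem.Dict.keys_mk]; exact ha)
  simp [this]

-- ===== VERDICT (by name: the statement is the Claim_ definition above) =====
theorem merge_predicate_spec : Claim_equal_merge_predicate := by
  intro g a _ hpre
  obtain ⟨hg, ha⟩ := hpre
  unfold Spec_merge_predicate
  rw [alt_closed_form g a hg ha]
  unfold merge_predicate
  by_cases hge : g = []
  · subst hge
    rw [if_pos (by simp)]
    have h0 : ∀ k, (PySem.Dict.mk ([] : List (String × Option Int × Option Int))).get? k = none := by
      intro k
      rw [PySem.Dict.get?_eq_none_iff_not_mem_keys, PySem.Dict.keys_mk]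
      simp
    have : (PySem.Set.ofList (([] ++ a : List (String × Option Int × Option Int)).map Prod.fst)).map (fun k =>
          (k, mergeBound (((PySem.Dict.mk ([] : List (String × Option Int × Option Int))).get? k).getD (none, none))
                (((PySem.Dict.mk a).get? k).getD (none, none))))
        = (a.map Prod.fst).map (fun k =>
          (k, (((PySem.Dict.mk a).get? k).getD (none, none)))) := by
      rw [List.nil_append, PySem.Set.ofList_eq_self_of_nodup _ ha]
      apply List.map_congr_left
      intro k _
      rw [h0 k]
      simp [mergeBound_none_left]
    rw [this, List.map_map]
    exact (map_get_self a ha).symm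
  · rw [if_neg (by simpa [List.isEmpty_iff] using hge)]
    by_cases hae : a = []
    · subst hae
      rw [if_pos (by simp)]
      have h0 : ∀ k, (PySem.Dict.mk ([] : List (String × Option Int × Option Int))).get? k = none := by
        intro k
        rw [PySem.Dict.get?_eq_none_iff_not_mem_keys, PySem.Dict.keys_mk]
        simp
      have : (PySem.Set.ofList ((g ++ [] : List (String × Option Int × Option Int)).map Prod.fst)).map (fun k =>
            (k, mergeBound (((PySem.Dict.mk g).get? k).getD (none, none))
                  (((PySem.Dict.mk ([] : List (String × Option Int × Option Int))).get? k).getD (none, none))))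
          = (g.map Prod.fst).map (fun k =>
            (k, (((PySem.Dict.mk g).get? k).getD (none, none)))) := by
        rw [List.append_nil, PySem.Set.ofList_eq_self_of_nodup _ hg]
        apply List.map_congr_left
        intro k _
        rw [h0 k]
        simp [mergeBound_none_right]
      rw [this, List.map_map]
      exact (map_get_self g hg).symm
    · rw [if_neg (by simpa [List.isEmpty_iff] using hae)]
      have hKnd : (PySem.Set.union (PySem.Set.ofList ((PySem.Dict.mk g).keys)) ((PySem.Dict.mk a).keys)).Nodup :=
        PySem.Set.nodup_union _ _ (PySem.Set.nodup_ofList _)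
      have hA := PySem.Dict.items_foldl_insert_fresh
        (l := PySem.Set.union (PySem.Set.ofList ((PySem.Dict.mk g).keys)) ((PySem.Dict.mk a).keys))
        (k := id)
        (v := fun v => mergeBound ((PySem.Dict.mk g).getD v (none, none)) ((PySem.Dict.mk a).getD v (none, none)))
        (d := PySem.Dict.empty) (fun v _ => by simp) (by simpa using hKnd)
      simp only [id] at hA
      have hK : PySem.Set.union (PySem.Set.ofList ((PySem.Dict.mk g).keys)) ((PySem.Dict.mk a).keys)
          = PySem.Set.ofList ((g ++ a).map Prod.fst) := by
        show PySem.Set.update (PySem.Set.ofList ((PySem.Dict.mk g).keys)) ((PySem.Dict.mk a).keys) = _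
        rw [List.map_append, PySem.Set.ofList_append, PySem.Dict.keys_mk, PySem.Dict.keys_mk]
      rw [hA, show PySem.Dict.empty.items = ([] : List (String × Option Int × Option Int)) from rfl,
        List.nil_append, hK]
      apply List.map_congr_left
      intro k _
      simp [PySem.Dict.getD_eq_get?_getD]
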